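-- pv_equiv track=rewrite | github.com/dataKernel/TIC-TAC-TOE | numerical.py | gen_arrayRows_win_combi
-- ===== SOURCE A (Python) =====
-- def     gen_arrayRows_win_combi(grid:list, size:int)-> list:
--     rowArray = []
--     combi = []
--     i = 0
--
--     #row combinations
--     for index, elem in enumerate(grid):
--         combi.append(index)
--         if (i == size - 1):
--             rowArray.append(combi)
--             combi = []
--             i = 0
--         else:
--             i += 1
--     return rowArray
-- ===== SOURCE B (Python) =====
-- def gen_arrayRows_win_combi(grid: list, size: int) -> list:
--     # Closed-form: number of complete rows is len(grid) // size; build each row arithmetically.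
--     if size <= 0:
--         return []
--     rows = len(grid) // size
--     return [[r * size + j for j in range(size)] for r in range(rows)]
-- ===== Notes on version B (the rewrite author's own statement) =====
-- stated objective: simpler
-- what changed: Replaces the per-element enumerate loop with its counter/accumulator state by a direct arithmetic construction: rows = len(grid)//size complete rows, each row [r*size+j for j in range(size)]; size <= 0 yields [] as in A.
import Mathlib
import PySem

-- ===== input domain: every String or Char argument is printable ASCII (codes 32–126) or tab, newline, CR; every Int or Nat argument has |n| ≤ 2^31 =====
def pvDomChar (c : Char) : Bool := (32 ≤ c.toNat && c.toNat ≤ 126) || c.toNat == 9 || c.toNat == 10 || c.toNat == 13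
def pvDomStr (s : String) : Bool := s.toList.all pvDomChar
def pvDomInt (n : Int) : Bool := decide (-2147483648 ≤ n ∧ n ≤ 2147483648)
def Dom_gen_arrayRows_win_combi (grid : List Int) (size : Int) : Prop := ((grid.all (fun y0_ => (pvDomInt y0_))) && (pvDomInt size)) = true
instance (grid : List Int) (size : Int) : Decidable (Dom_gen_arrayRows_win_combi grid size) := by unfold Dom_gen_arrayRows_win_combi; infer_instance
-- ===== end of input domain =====

-- B groups the indices 0..len(grid)-1 into the complete rows arithmetically instead of
-- A's enumerate loop with a counter; objective: simpler (same O(n) cost).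

-- ===== PORT A =====
-- one step of A's for-loop: state = (rowArray, combi, i), p = (index, elem)
def pvStepA (size : Int) (st : List (List Int) × List Int × Int) (p : Int × Int) :
    List (List Int) × List Int × Int :=
  let combi := st.2.1 ++ [p.1]
  if st.2.2 == size - 1 then (st.1 ++ [combi], ([] : List Int), (0 : Int))
  else (st.1, combi, st.2.2 + 1)

def gen_arrayRows_win_combi (grid : List Int) (size : Int) : List (List Int) :=
  ((PySem.List.enumerate grid).foldl (pvStepA size) ([], [], 0)).1

-- ===== PORT B =====
def gen_arrayRows_win_combi_alt (grid : List Int) (size : Int) : List (List Int) :=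
  if size ≤ 0 then []
  else
    let rows := PySem.Int.floordiv (grid.length : Int) size
    (PySem.List.pyRange 0 rows 1).map (fun r =>
      (PySem.List.pyRange 0 size 1).map (fun j => r * size + j))

-- ===== PRECONDITION & SPEC =====
def Spec_gen_arrayRows_win_combi (grid : List Int) (size : Int) (out : List (List Int)) : Prop := out = gen_arrayRows_win_combi_alt grid size
instance (grid : List Int) (size : Int) (out : List (List Int)) : Decidable (Spec_gen_arrayRows_win_combi grid size out) := by unfold Spec_gen_arrayRows_win_combi; infer_instance

-- ===== CLAIM (what is proved, stated in full; the proofs are below) =====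
def Claim_equal_gen_arrayRows_win_combi : Prop := ∀ (grid : List Int) (size : Int), Dom_gen_arrayRows_win_combi grid size → Spec_gen_arrayRows_win_combi grid size (gen_arrayRows_win_combi grid size)

-- ===== LEMMAS AND PROOFS =====

-- A's step, seen over the index alone (pvStepA ignores the element).
def pvG (size : Int) (st : List (List Int) × List Int × Int) (j : Int) :
    List (List Int) × List Int × Int :=
  pvStepA size st (j, 0)

-- the complete chunks of s consecutive indices starting at k out of n indices
def pvChunks (size k : Int) (n : Nat) : List (List Int) :=
  if h : (n : Int) < size ∨ size ≤ 0 then []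
  else PySem.List.pyRange k (k + size) 1 :: pvChunks size (k + size) (n - size.toNat)
termination_by n
decreasing_by push_neg at h; omega

lemma pvNegCase (size : Int) (hs : size ≤ 0) :
    ∀ (l : List (Int × Int)) (rows : List (List Int)) (c : List Int) (i : Int), 0 ≤ i →
      (l.foldl (pvStepA size) (rows, c, i)).1 = rows := by
  intro l
  induction l with
  | nil => intro rows c i _; rfl
  | cons p t ih =>
      intro rows c i hi
      have hcond : (i == size - 1) = false := by
        simp only [beq_eq_false_iff_ne]; omega
      simp only [List.foldl_cons, pvStepA, hcond, if_false]
      exact ih rows (c ++ [p.1]) (i + 1) (by omega)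

lemma pvP1 (size : Int) (hs : 0 < size) :
    ∀ (j : Nat), (j : Int) < size → ∀ (k : Int) (rows : List (List Int)),
      (PySem.List.pyRange k (k + (j : Int)) 1).foldl (pvG size) (rows, [], 0)
        = (rows, PySem.List.pyRange k (k + (j : Int)) 1, (j : Int)) := by
  intro j
  induction j with
  | zero =>
      intro _ k rows
      simp [PySem.List.pyRange_one_eq_nil (by omega : k + ((0:Nat) : Int) ≤ k)]
  | succ j ih =>
      intro hj k rows
      have hj' : (j : Int) < size := by push_cast at hj ⊢; omega
      have hsplit : k + ((j + 1 : Nat) : Int) = (k + (j : Int)) + 1 := by push_cast; ring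
      rw [hsplit, PySem.List.pyRange_one_succ_right (by omega : k ≤ k + (j : Int)),
        List.foldl_append, ih hj']
      have hcond : (((j : Int)) == size - 1) = false := by
        simp only [beq_eq_false_iff_ne]; push_cast at hj; omega
      simp only [List.foldl_cons, List.foldl_nil, pvG, pvStepA, hcond, if_false]
      rw [← PySem.List.pyRange_one_succ_right (by omega : k ≤ k + (j : Int))]
      push_cast; ring_nf

lemma pvP2 (size : Int) (hs : 0 < size) (k : Int) (rows : List (List Int)) :
    (PySem.List.pyRange k (k + size) 1).foldl (pvG size) (rows, [], 0)
      = (rows ++ [PySem.List.pyRange k (k + size) 1], [], 0) := by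
  have hj : ((size - 1).toNat : Int) = size - 1 := by omega
  have hsplit : k + size = (k + ((size - 1).toNat : Int)) + 1 := by omega
  rw [hsplit, PySem.List.pyRange_one_succ_right (by omega), List.foldl_append,
    pvP1 size hs (size - 1).toNat (by omega) k rows]
  have hcond : ((((size - 1).toNat : Int)) == size - 1) = true := by
    simp only [beq_iff_eq]; omega
  simp only [List.foldl_cons, List.foldl_nil, pvG, pvStepA, hcond, if_true]

lemma pvMain (size : Int) (hs : 0 < size) :
    ∀ (n : Nat) (k : Int) (rows : List (List Int)),
      ((PySem.List.pyRange k (k + (n : Int)) 1).foldl (pvG size) (rows, [], 0)).1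
        = rows ++ pvChunks size k n := by
  intro n
  induction n using Nat.strong_induction_on with
  | _ n ih =>
    intro k rows
    by_cases hn : (n : Int) < size
    · rw [pvChunks, dif_pos (Or.inl hn), pvP1 size hs n hn k rows]
      simp
    · have hsn : size ≤ (n : Int) := by omega
      rw [pvChunks, dif_neg (by push_neg; constructor <;> omega)]
      rw [PySem.List.pyRange_one_append k (k + size) (k + (n : Int)) (by omega) (by omega),
        List.foldl_append, pvP2 size hs k rows]
      have hrest : k + (n : Int) = (k + size) + ((n - size.toNat : Nat) : Int) := by
        push_cast; omega
      rw [hrest, ih (n - size.toNat) (by omega) (k + size) (rows ++ [PySem.List.pyRange k (k + size) 1])]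
      simp

lemma pvMapAdd (k m : Int) :
    (PySem.List.pyRange 0 m 1).map (fun j => k + j) = PySem.List.pyRange k (k + m) 1 := by
  simp [PySem.List.pyRange_one, List.map_map, Function.comp_def, add_sub_cancel_left]

lemma pvChunksEq (size : Int) (hs : 0 < size) :
    ∀ (n : Nat) (k : Int),
      pvChunks size k n
        = (List.range (n / size.toNat)).map (fun r : Nat =>
            (PySem.List.pyRange 0 size 1).map (fun j => k + (r : Int) * size + j)) := by
  intro n
  induction n using Nat.strong_induction_on with
  | _ n ih =>
    intro k
    by_cases hn : (n : Int) < size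
    · have h0 : n / size.toNat = 0 := Nat.div_eq_of_lt (by omega)
      rw [pvChunks, dif_pos (Or.inl hn), h0]
      simp
    · have hsn : size ≤ (n : Int) := by omega
      have hdiv : n / size.toNat = (n - size.toNat) / size.toNat + 1 :=
        Nat.div_eq_sub_div (by omega) (by omega)
      rw [pvChunks, dif_neg (by push_neg; constructor <;> omega), hdiv,
        List.range_succ_eq_map, List.map_cons, List.map_map]
      congr 1
      · rw [← pvMapAdd k size]
        simp
      · rw [ih (n - size.toNat) (by omega) (k + size)]
        apply List.map_congr_left
        intro r _
        apply List.map_congr_left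
        intro j _
        push_cast; ring

lemma pvFloordivNat (n : Nat) (size : Int) (hs : 0 < size) :
    PySem.Int.floordiv (n : Int) size = ((n / size.toNat : Nat) : Int) := by
  rw [show size = ((size.toNat : Nat) : Int) by omega]
  exact PySem.Int.floordiv_natCast n size.toNat

-- ===== VERDICT (by name: the statement is the Claim_ definition above) =====
theorem gen_arrayRows_win_combi_spec : Claim_equal_gen_arrayRows_win_combi := by
  intro grid size _
  unfold Spec_gen_arrayRows_win_combi gen_arrayRows_win_combi gen_arrayRows_win_combi_alt
  by_cases hs : size ≤ 0
  · rw [if_pos hs]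
    exact pvNegCase size hs _ [] [] 0 le_rfl
  · have hs' : 0 < size := by omega
    rw [if_neg hs]
    rw [PySem.List.enumerate_eq_map_pyRange (d := 0), List.foldl_map]
    have hfun : (fun (st : List (List Int) × List Int × Int) (j : Int) =>
        pvStepA size st (j, PySem.List.pyGetD grid j 0)) = pvG size := rfl
    rw [hfun]
    simp only [PySem.List.len_eq]
    have hmain := pvMain size hs' grid.length 0 []
    simp only [zero_add, List.nil_append] at hmain
    rw [hmain, pvChunksEq size hs' grid.length 0, pvFloordivNat grid.length size hs',
      PySem.List.pyRange_zero_natCast, List.map_map]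
    apply List.map_congr_left
    intro r _
    simp
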